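-- pv_equiv track=rewrite | github.com/llLucidll/NgmiCodes | Arrays&Hashing/LX. FindCumulativeBuySellVolume/FindCumulativeBuySellVolume.py | totalSharesPerDay
-- ===== SOURCE A (Python) =====
-- def totalSharesPerDay(stocks):
--     volume = {} # {day: {company: stocks}}
--     prev = {}
--     for i in range(len(stocks)):
--         comp = stocks[i]
--         for data in comp:
--             date = data[0]
--             vol = data[-1]
--             month, day = date[0], date[-1]
--             if day in volume:
--                 volume[day][i] = vol
--             else:
--                 volume[day] = {}
--                 volume[day][i] = vol
--
--     days = sorted(volume.keys())
--     result = []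
--
--     for day in days:
--         for comp, vol in volume[day].items():
--             prev[comp] = vol
--
--         total = sum(prev.values())
--         result.append(total)
--
--     return result
-- ===== SOURCE B (Python) =====
-- def totalSharesPerDay(stocks):
--     # Flatten everything into one event list (day, company, volume), stable-sort it
--     # by day, and do a single group-by sweep with a running total adjusted by the
--     # delta of each company's new volume; no dict-of-dicts is ever built.
--     events = [(data[0][-1], i, data[-1])
--               for i, comp in enumerate(stocks) for data in comp]
--     events.sort(key=lambda e: e[0])
--     cur = {}
--     total = 0
--     result = []
--     prev_day = None
--     for day, c, v in events:
--         if prev_day is not None and day != prev_day: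
--             result.append(total)
--         total += v - cur.get(c, 0)
--         cur[c] = v
--         prev_day = day
--     if prev_day is not None:
--         result.append(total)
--     return result
-- ===== Notes on version B (the rewrite author's own statement) =====
-- stated objective: alternative
-- what changed: B never builds A's day->company nested dict: it flattens all rows into one (day, company, volume) event list, stable-sorts it by day, and does a single group-by sweep keeping one running total adjusted by each event's delta, instead of A's grouping dict plus a full re-summation of the prev dict for every day.
import Mathlib
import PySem

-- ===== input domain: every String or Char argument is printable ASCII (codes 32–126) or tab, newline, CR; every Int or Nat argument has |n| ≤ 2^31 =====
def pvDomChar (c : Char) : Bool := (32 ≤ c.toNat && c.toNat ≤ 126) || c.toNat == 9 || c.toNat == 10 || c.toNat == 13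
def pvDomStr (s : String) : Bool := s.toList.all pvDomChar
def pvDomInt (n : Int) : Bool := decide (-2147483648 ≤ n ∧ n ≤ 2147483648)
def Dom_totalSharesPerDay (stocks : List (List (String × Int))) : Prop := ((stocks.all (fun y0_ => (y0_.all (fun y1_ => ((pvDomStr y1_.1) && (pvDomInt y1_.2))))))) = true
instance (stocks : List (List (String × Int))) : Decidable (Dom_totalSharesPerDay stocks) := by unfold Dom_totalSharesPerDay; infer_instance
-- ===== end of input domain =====

-- B is an alternative algorithm: one flat (day, company, volume) event list, stable-sorted by
-- day, swept once with a running total adjusted by deltas — A's nested day→company dict and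
-- its per-day re-summation of prev.values() disappear.

-- ===== PORT A =====
-- grouping pass of A: volume[day][i] = vol  (day = date[-1]; date[0] is also read,
-- it only matters for the IndexError on date == "", excluded by Pre_)
def pvBuildA (stocks : List (List (String × Int))) : PySem.Dict Char (PySem.Dict Int Int) :=
  (PySem.List.enumerate stocks 0).foldl (fun volume p =>
    p.2.foldl (fun volume data =>
      let date := data.1
      let vol := data.2
      let day := (PySem.Str.pyGet? date (-1)).getD ' '   -- date[-1]; none = IndexError, outside Pre_
      if volume.contains day then
        volume.insert day ((volume.getD day PySem.Dict.empty).insert p.1 vol)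
      else
        volume.insert day ((PySem.Dict.empty : PySem.Dict Int Int).insert p.1 vol)) volume)
    PySem.Dict.empty

def totalSharesPerDay (stocks : List (List (String × Int))) : List Int :=
  let volume := pvBuildA stocks
  let days := PySem.List.sorted volume.keys (fun x => x) false
  let fin := days.foldl (fun (st : PySem.Dict Int Int × List Int) day =>
      let prev := (volume.getD day PySem.Dict.empty).items.foldl
        (fun pr (q : Int × Int) => pr.insert q.1 q.2) st.1
      (prev, st.2 ++ [prev.values.sum])) (PySem.Dict.empty, [])
  fin.2

-- ===== PORT B =====
-- B: flatten into events (day, company index, volume), stable-sort by day, then a single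
-- sweep: flush the running total at each day boundary, update it by the event's delta.
def totalSharesPerDay_alt (stocks : List (List (String × Int))) : List Int :=
  let events := (PySem.List.enumerate stocks 0).flatMap (fun p =>
      p.2.map (fun data => ((PySem.Str.pyGet? data.1 (-1)).getD ' ', p.1, data.2)))
      -- date[-1]; none = IndexError, outside Pre_
  let sevs := PySem.List.sorted events (fun e => e.1) false
  let fin := sevs.foldl (fun (st : PySem.Dict Int Int × Int × List Int × Option Char) e =>
      (st.1.insert e.2.1 e.2.2,
       st.2.1 + (e.2.2 - st.1.getD e.2.1 0),
       (if st.2.2.2 ≠ none ∧ st.2.2.2 ≠ some e.1 then st.2.2.1 ++ [st.2.1] else st.2.2.1),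
       some e.1)) (PySem.Dict.empty, 0, [], none)
  match fin.2.2.2 with
  | some _ => fin.2.2.1 ++ [fin.2.1]
  | none => fin.2.2.1

-- ===== PRECONDITION & SPEC =====
-- Pre_ excludes exactly the inputs where Python A raises: an empty date string
-- makes date[0] (and date[-1]) an IndexError.
def Pre_totalSharesPerDay (stocks : List (List (String × Int))) : Prop :=
  ∀ comp ∈ stocks, ∀ p ∈ comp, p.1 ≠ ""
instance (stocks : List (List (String × Int))) : Decidable (Pre_totalSharesPerDay stocks) := by
  unfold Pre_totalSharesPerDay; infer_instance

def pvWitness_totalSharesPerDay : (List (List (String × Int))) :=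
  [[("a1", 5), ("a2", 3)], [("b1", 2)]]

def Spec_totalSharesPerDay (stocks : List (List (String × Int))) (out : List Int) : Prop := out = totalSharesPerDay_alt stocks
instance (stocks : List (List (String × Int))) (out : List Int) : Decidable (Spec_totalSharesPerDay stocks out) := by unfold Spec_totalSharesPerDay; infer_instance

-- ===== CLAIM (what is proved, stated in full; the proofs are below) =====
def Claim_equal_totalSharesPerDay : Prop := ∀ (stocks : List (List (String × Int))), Dom_totalSharesPerDay stocks → Pre_totalSharesPerDay stocks → Spec_totalSharesPerDay stocks (totalSharesPerDay stocks)

-- ===== LEMMAS AND PROOFS =====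

-- the flat event list both ports derive their work from
def pvEvents (stocks : List (List (String × Int))) : List (Char × Int × Int) :=
  (PySem.List.enumerate stocks 0).flatMap (fun p =>
      p.2.map (fun data => ((PySem.Str.pyGet? data.1 (-1)).getD ' ', p.1, data.2)))

-- named step functions
def pvModStep (d : PySem.Dict Char (PySem.Dict Int Int)) (e : Char × Int × Int) :
    PySem.Dict Char (PySem.Dict Int Int) :=
  d.modify e.1 PySem.Dict.empty (fun inner => inner.insert e.2.1 e.2.2)

def pvInsP (m : PySem.Dict Int Int) (q : Int × Int) : PySem.Dict Int Int := m.insert q.1 q.2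

def pvIns (m : PySem.Dict Int Int) (e : Char × Int × Int) : PySem.Dict Int Int :=
  m.insert e.2.1 e.2.2

def pvEvStep (st : PySem.Dict Int Int × Int × List Int × Option Char) (e : Char × Int × Int) :
    PySem.Dict Int Int × Int × List Int × Option Char :=
  (st.1.insert e.2.1 e.2.2,
   st.2.1 + (e.2.2 - st.1.getD e.2.1 0),
   (if st.2.2.2 ≠ none ∧ st.2.2.2 ≠ some e.1 then st.2.2.1 ++ [st.2.1] else st.2.2.1),
   some e.1)

-- value of the LAST pair with key k (Python's overwrite semantics)
def pvLast : List (Int × Int) → Int → Option Int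
  | [], _ => none
  | q :: t, k => (pvLast t k).or (if q.1 = k then some q.2 else none)

-- ---- step 1: A's grouping dict is the modify-fold over the event list ----

theorem pvStep_eq (volume : PySem.Dict Char (PySem.Dict Int Int)) (day : Char) (i v : Int) :
    (if volume.contains day then
        volume.insert day ((volume.getD day PySem.Dict.empty).insert i v)
      else
        volume.insert day ((PySem.Dict.empty : PySem.Dict Int Int).insert i v))
    = volume.modify day PySem.Dict.empty (fun inner => inner.insert i v) := by
  by_cases h : volume.contains day = true
  · simp [h, PySem.Dict.modify]
  · simp only [Bool.not_eq_true] at h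
    simp [h, PySem.Dict.modify, PySem.Dict.getD_of_not_contains _ _ h]

theorem pvBuildA_eq (stocks : List (List (String × Int))) :
    pvBuildA stocks = (pvEvents stocks).foldl pvModStep PySem.Dict.empty := by
  unfold pvBuildA pvEvents
  rw [List.flatMap, List.foldl_flatten, List.foldl_map]
  congr 1
  funext volume p
  rw [List.foldl_map]
  congr 1
  funext d' q
  exact pvStep_eq d' ((PySem.Str.pyGet? q.1 (-1)).getD ' ') p.1 q.2

-- ---- step 2: per-day inner dict of the grouping pass ----

theorem pvGetD_foldl_modStep (evs : List (Char × Int × Int)) :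
    ∀ (D0 : PySem.Dict Char (PySem.Dict Int Int)) (d : Char),
    (evs.foldl pvModStep D0).getD d PySem.Dict.empty
      = (evs.filter (fun e => e.1 == d)).foldl pvIns (D0.getD d PySem.Dict.empty) := by
  induction evs with
  | nil => intro D0 d; rfl
  | cons e t ih =>
    intro D0 d
    simp only [List.foldl_cons, List.filter_cons]
    by_cases h : e.1 = d
    · simp only [h, beq_self_eq_true, if_true, List.foldl_cons, ih]
      congr 1
      simp [pvModStep, pvIns, h]
    · have hb : (e.1 == d) = false := by simpa using h
      simp only [hb, ih]
      congr 1
      simp only [pvModStep]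
      rw [PySem.Dict.getD_modify, if_neg (Ne.symm h)]

theorem pvKeys_foldl_modStep (evs : List (Char × Int × Int)) :
    (evs.foldl pvModStep PySem.Dict.empty).keys = PySem.Set.ofList (evs.map (fun e => e.1)) := by
  have := PySem.Dict.keys_foldl_modify_key evs (fun e => e.1) PySem.Dict.empty
      (fun _ e inner => inner.insert e.2.1 e.2.2) PySem.Dict.empty
  simpa [pvModStep, PySem.Set.update, PySem.Set.ofList, PySem.Dict.keys_empty] using this

-- ---- step 3: stability — filtering one day out of the sorted list ----

theorem pvFilter_insertBy_ne (x : Char × Int × Int) (d : Char) (hd : d ≠ x.1) :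
    ∀ ys : List (Char × Int × Int),
    (PySem.List.insertBy (fun a b => decide (a.1 < b.1)) x ys).filter (fun e => e.1 == d)
      = ys.filter (fun e => e.1 == d) := by
  intro ys
  induction ys with
  | nil => simp [PySem.List.insertBy, Ne.symm hd]
  | cons y t ih =>
    show (if decide (x.1 < y.1) then x :: y :: t
          else y :: PySem.List.insertBy (fun a b => decide (a.1 < b.1)) x t).filter
            (fun e => e.1 == d) = _
    by_cases h : x.1 < y.1
    · simp [h, List.filter_cons, Ne.symm hd]
    · rw [if_neg (by simpa using h), List.filter_cons, List.filter_cons, ih]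

theorem pvFilter_insertBy_self (x : Char × Int × Int) :
    ∀ ys : List (Char × Int × Int), ys.Pairwise (fun a b => a.1 ≤ b.1) →
    (PySem.List.insertBy (fun a b => decide (a.1 < b.1)) x ys).filter (fun e => e.1 == x.1)
      = ys.filter (fun e => e.1 == x.1) ++ [x] := by
  intro ys
  induction ys with
  | nil => simp [PySem.List.insertBy]
  | cons y t ih =>
    intro hp
    show (if decide (x.1 < y.1) then x :: y :: t
          else y :: PySem.List.insertBy (fun a b => decide (a.1 < b.1)) x t).filter
            (fun e => e.1 == x.1) = _
    rcases List.pairwise_cons.mp hp with ⟨hy, ht⟩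
    by_cases h : x.1 < y.1
    · have hnone : (y :: t).filter (fun e => e.1 == x.1) = [] := by
        rw [List.filter_eq_nil_iff]
        intro e he
        rcases List.mem_cons.mp he with rfl | he'
        · simpa using (ne_of_gt h)
        · have : y.1 ≤ e.1 := hy e he'
          simpa using (ne_of_gt (lt_of_lt_of_le h this))
      have hcons : (x :: y :: t).filter (fun e => e.1 == x.1)
          = x :: (y :: t).filter (fun e => e.1 == x.1) := by
        rw [List.filter_cons]; simp
      rw [if_pos (by simpa using h), hcons, hnone]
      simp
    · rw [if_neg (by simpa using h), List.filter_cons, List.filter_cons, ih ht]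
      by_cases hyx : y.1 = x.1 <;> simp [hyx]

theorem pvFilter_sorted (d : Char) (evs : List (Char × Int × Int)) :
    (PySem.List.sorted evs (fun e => e.1)).filter (fun e => e.1 == d)
      = evs.filter (fun e => e.1 == d) := by
  induction evs using List.reverseRecOn with
  | nil => rfl
  | append_singleton l x ih =>
    rw [PySem.List.sorted_eq_foldl_insertBy, List.foldl_append, List.foldl_cons, List.foldl_nil,
        ← PySem.List.sorted_eq_foldl_insertBy]
    by_cases h : d = x.1
    · subst h
      rw [pvFilter_insertBy_self x _ (PySem.List.sorted_pairwise l (fun e => e.1))]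
      rw [ih, List.filter_append]
      simp
    · have hne : (x.1 == d) = false := by simpa using (Ne.symm h)
      rw [pvFilter_insertBy_ne x d h, ih, List.filter_append]
      simp [hne]

-- ---- step 4: a weakly key-sorted list is the concatenation of its day groups ----

theorem pvGrouping (D : List Char) :
    ∀ l : List (Char × Int × Int), l.Pairwise (fun a b => a.1 ≤ b.1) →
    D.Pairwise (· < ·) → (∀ e ∈ l, e.1 ∈ D) →
    D.flatMap (fun d => l.filter (fun e => e.1 == d)) = l := by
  induction D with
  | nil =>
    intro l _ _ hmem
    cases l with
    | nil => rfl
    | cons e t => exact absurd (hmem e (List.mem_cons_self)) (by simp)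
  | cons d D' ih =>
    intro l hl hD hmem
    rcases List.pairwise_cons.mp hD with ⟨hdlt, hD'⟩
    set p : (Char × Int × Int) → Bool := fun e => e.1 == d with hp
    have hsplit : l.takeWhile p ++ l.dropWhile p = l := List.takeWhile_append_dropWhile
    have htake : ∀ e ∈ l.takeWhile p, e.1 = d := by
      intro e he
      have := List.mem_takeWhile_imp he
      simpa [hp] using this
    have hdropgt : ∀ e ∈ l.dropWhile p, d < e.1 := by
      have hpl : (l.dropWhile p).Pairwise (fun a b => a.1 ≤ b.1) :=
        hl.sublist (List.dropWhile_sublist p)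
      cases hh : l.dropWhile p with
      | nil => intro e he; simp at he
      | cons h0 t0 =>
        have hh0p : p h0 = false := by
          have := List.head?_dropWhile_not p l
          rw [hh] at this; simpa using this
        have hh0 : h0.1 ≠ d := by simpa [hp] using hh0p
        have hh0mem : h0 ∈ l := (List.dropWhile_sublist p).mem (hh ▸ List.mem_cons_self)
        have hh0d : d < h0.1 := by
          have : h0.1 ∈ d :: D' := hmem h0 hh0mem
          rcases List.mem_cons.mp this with h' | h'
          · exact absurd h' hh0
          · exact hdlt _ h'
        intro e he
        rw [hh] at hpl
        rcases List.mem_cons.mp he with rfl | he'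
        · exact hh0d
        · exact lt_of_lt_of_le hh0d ((List.pairwise_cons.mp hpl).1 e he')
    have hfd : l.filter p = l.takeWhile p := by
      conv_lhs => rw [← hsplit]
      rw [List.filter_append, List.filter_eq_self.mpr (fun e he => by simp [hp, htake e he]),
          List.filter_eq_nil_iff.mpr (fun e he => by simp [hp]; exact ne_of_gt (hdropgt e he))]
      simp
    have hfrest : ∀ d' ∈ D', l.filter (fun e => e.1 == d') = (l.dropWhile p).filter (fun e => e.1 == d') := by
      intro d' hd'
      conv_lhs => rw [← hsplit]
      rw [List.filter_append, List.filter_eq_nil_iff.mpr (fun e he => by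
        have := htake e he
        simp [this]; exact ne_of_lt (hdlt d' hd'))]
      simp
    have hih : D'.flatMap (fun d' => (l.dropWhile p).filter (fun e => e.1 == d')) = l.dropWhile p := by
      refine ih _ (hl.sublist (List.dropWhile_sublist p)) hD' ?_
      intro e he
      have : e.1 ∈ d :: D' := hmem e ((List.dropWhile_sublist p).mem he)
      rcases List.mem_cons.mp this with h' | h'
      · exact absurd h' (ne_of_gt (hdropgt e he))
      · exact h'
    rw [List.flatMap_cons, hfd]
    calc l.takeWhile p ++ D'.flatMap (fun d' => l.filter (fun e => e.1 == d'))
        = l.takeWhile p ++ D'.flatMap (fun d' => (l.dropWhile p).filter (fun e => e.1 == d')) := by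
          congr 1
          simp only [List.flatMap_def]
          exact congrArg List.flatten (List.map_congr_left (fun d' hd' => hfrest d' hd'))
      _ = l := by rw [hih]; exact hsplit

-- ---- step 5: pointwise characterisation of insert-folds ----

theorem pvGet?_foldl_insP (l : List (Int × Int)) :
    ∀ (b : PySem.Dict Int Int) (k : Int),
    (l.foldl pvInsP b).get? k = (pvLast l k).or (b.get? k) := by
  induction l with
  | nil => intro b k; simp [pvLast]
  | cons q t ih =>
    intro b k
    simp only [List.foldl_cons, pvLast, ih, pvInsP, PySem.Dict.get?_insert, Option.or_assoc]
    congr 1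
    by_cases h : q.1 = k
    · simp [h]
    · simp [h, Ne.symm h]

theorem pvLast_eq_none (m : List (Int × Int)) (k : Int) (h : k ∉ m.map (·.1)) :
    pvLast m k = none := by
  induction m with
  | nil => rfl
  | cons q t ih =>
    simp only [List.map_cons, List.mem_cons] at h
    have h1 : q.1 ≠ k := fun hq => h (Or.inl hq.symm)
    have h2 : k ∉ t.map (·.1) := fun hq => h (Or.inr hq)
    simp [pvLast, ih h2, h1]

theorem pvLast_of_mem (m : List (Int × Int)) (k v : Int)
    (hnd : (m.map (·.1)).Nodup) (hm : (k, v) ∈ m) : pvLast m k = some v := by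
  induction m with
  | nil => cases hm
  | cons q t ih =>
    simp only [List.map_cons, List.nodup_cons] at hnd
    rcases List.mem_cons.mp hm with h | h
    · cases h.symm
      have hnone : pvLast t k = none := pvLast_eq_none t k (by simpa using hnd.1)
      simp [pvLast, hnone]
    · simp [pvLast, ih hnd.2 h]

theorem pvLast_items (D : PySem.Dict Int Int) (k : Int) (hnd : D.keys.Nodup) :
    pvLast D.items k = D.get? k := by
  cases h : D.get? k with
  | some v =>
    exact pvLast_of_mem D.items k v (by simpa [PySem.Dict.keys] using hnd)
      (PySem.Dict.mem_items_of_get?_eq_some D h)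
  | none =>
    refine pvLast_eq_none D.items k ?_
    have := (PySem.Dict.get?_eq_none_iff_not_mem_keys D k).mp h
    simpa [PySem.Dict.keys] using this

-- ---- step 6: equal lookups ⇒ equal value sums (keys as a set) ----

theorem pvSumEq (c p : PySem.Dict Int Int) (hc : c.keys.Nodup) (hp : p.keys.Nodup)
    (h : ∀ k, c.get? k = p.get? k) : c.values.sum = p.values.sum := by
  have hperm : c.keys.Perm p.keys := by
    refine (List.perm_ext_iff_of_nodup hc hp).mpr ?_
    intro k
    constructor <;> intro hk
    · by_contra hnk
      have := (PySem.Dict.get?_eq_none_iff_not_mem_keys p k).mpr hnk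
      rw [← h k] at this
      exact ((PySem.Dict.get?_eq_none_iff_not_mem_keys c k).mp this) hk
    · by_contra hnk
      have := (PySem.Dict.get?_eq_none_iff_not_mem_keys c k).mpr hnk
      rw [h k] at this
      exact ((PySem.Dict.get?_eq_none_iff_not_mem_keys p k).mp this) hk
  rw [PySem.Dict.values_eq_map_keys c hc 0, PySem.Dict.values_eq_map_keys p hp 0]
  have hfun : ∀ k, c.getD k 0 = p.getD k 0 := by
    intro k; rw [PySem.Dict.getD_eq_get?_getD, PySem.Dict.getD_eq_get?_getD, h k]
  calc (c.keys.map (fun k => c.getD k 0)).sum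
      = (c.keys.map (fun k => p.getD k 0)).sum := by
        congr 1; exact List.map_congr_left (fun k _ => hfun k)
    _ = (p.keys.map (fun k => p.getD k 0)).sum := (hperm.map _).sum_eq

-- ---- step 7: one insert changes the value sum by its delta ----

theorem pvMap_overwrite_id (k v : Int) (l : List (Int × Int))
    (h : ∀ p ∈ l, p.1 ≠ k) :
    l.map (fun p => if p.1 == k then (k, v) else p) = l := by
  conv_rhs => rw [← List.map_id l]
  refine List.map_congr_left (fun p hp => ?_)
  simp [h p hp]

theorem pvSum_overwrite (k v w : Int) (l : List (Int × Int))
    (hnd : (l.map (·.1)).Nodup) (hm : (k, w) ∈ l) :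
    ((l.map (fun p => if p.1 == k then (k, v) else p)).map (·.2)).sum
      = (l.map (·.2)).sum + (v - w) := by
  induction l with
  | nil => cases hm
  | cons hd tl ih =>
    simp only [List.map_cons, List.nodup_cons] at hnd
    by_cases hk : hd.1 = k
    · have hw : hd = (k, w) := by
        rcases List.mem_cons.mp hm with h | h
        · exact h.symm ▸ rfl
        · exact absurd (hk ▸ List.mem_map_of_mem (f := (·.1)) h) hnd.1
      have htl : tl.map (fun p => if p.1 == k then (k, v) else p) = tl := by
        refine pvMap_overwrite_id k v tl (fun p hp hpk => hnd.1 ?_)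
        rw [hk, ← hpk]
        exact List.mem_map_of_mem hp
      subst hw
      simp only [List.map_cons, beq_self_eq_true, if_true, htl, List.sum_cons]
      ring
    · have hm' : (k, w) ∈ tl := by
        rcases List.mem_cons.mp hm with h | h
        · exact absurd (h ▸ rfl : hd.1 = k) hk
        · exact h
      simp only [List.map_cons]
      rw [if_neg (by simpa using hk)]
      simp only [List.sum_cons, ih hnd.2 hm']
      ring

theorem pvSumValuesInsert (d : PySem.Dict Int Int) (k v : Int) (h : d.keys.Nodup) :
    (d.insert k v).values.sum = d.values.sum + (v - d.getD k 0) := by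
  by_cases hc : d.contains k = true
  · have hs : (d.get? k).isSome := by rw [← PySem.Dict.contains_eq_isSome_get?]; exact hc
    obtain ⟨w, hw⟩ := Option.isSome_iff_exists.mp hs
    have hmem : (k, w) ∈ d.items := PySem.Dict.mem_items_of_get?_eq_some _ hw
    rw [PySem.Dict.getD_of_get?_eq_some _ 0 hw]
    have := pvSum_overwrite k v w d.items h hmem
    simpa [PySem.Dict.values, PySem.Dict.items_insert_of_contains d v hc] using this
  · have hc' : d.contains k = false := by simpa using hc
    rw [PySem.Dict.getD_of_not_contains _ _ hc']
    simp [PySem.Dict.values, PySem.Dict.items_insert_of_not_contains d v hc']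

-- ---- step 8: B's sweep, group by group ----

theorem pvNoFlush (d : Char) (l : List (Char × Int × Int)) :
    ∀ (cur : PySem.Dict Int Int) (total : Int) (res : List Int),
    (∀ e ∈ l, e.1 = d) → cur.keys.Nodup → total = cur.values.sum →
    l.foldl pvEvStep (cur, total, res, some d)
      = (l.foldl pvIns cur, (l.foldl pvIns cur).values.sum, res, some d) := by
  induction l with
  | nil => intro cur total res _ _ ht; simp [ht]
  | cons e t ih =>
    intro cur total res hall hnd ht
    have he : e.1 = d := hall e List.mem_cons_self
    simp only [List.foldl_cons, pvEvStep, pvIns, he]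
    rw [if_neg (by simp)]
    exact ih _ _ _ (fun x hx => hall x (List.mem_cons_of_mem _ hx))
      (PySem.Dict.nodup_keys_insert cur e.2.1 e.2.2 hnd)
      (by rw [ht, ← pvSumValuesInsert cur e.2.1 e.2.2 hnd])

theorem pvGroup (d : Char) (l : List (Char × Int × Int)) (hne : l ≠ [])
    (hall : ∀ e ∈ l, e.1 = d)
    (cur : PySem.Dict Int Int) (total : Int) (res : List Int) (pd : Option Char)
    (hpd : pd ≠ some d) (hnd : cur.keys.Nodup) (ht : total = cur.values.sum) :
    l.foldl pvEvStep (cur, total, res, pd)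
      = (l.foldl pvIns cur, (l.foldl pvIns cur).values.sum,
         (match pd with | none => res | some _ => res ++ [total]), some d) := by
  cases l with
  | nil => exact absurd rfl hne
  | cons e t =>
    have he : e.1 = d := hall e List.mem_cons_self
    simp only [List.foldl_cons, pvEvStep, pvIns, he]
    cases pd with
    | none =>
      rw [if_neg (by simp)]
      exact pvNoFlush d t _ _ _ (fun x hx => hall x (List.mem_cons_of_mem _ hx))
        (PySem.Dict.nodup_keys_insert cur e.2.1 e.2.2 hnd)
        (by rw [ht, ← pvSumValuesInsert cur e.2.1 e.2.2 hnd])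
    | some x =>
      rw [if_pos (And.intro (by simp) hpd)]
      exact pvNoFlush d t _ _ _ (fun x hx => hall x (List.mem_cons_of_mem _ hx))
        (PySem.Dict.nodup_keys_insert cur e.2.1 e.2.2 hnd)
        (by rw [ht, ← pvSumValuesInsert cur e.2.1 e.2.2 hnd])

-- nodup keys survive an insert-fold over events
theorem pvNodup_foldl_ins (l : List (Char × Int × Int)) (cur : PySem.Dict Int Int)
    (h : cur.keys.Nodup) : (l.foldl pvIns cur).keys.Nodup := by
  have := PySem.Dict.nodup_keys_foldl_insert_key l (fun e => e.2.1) (fun _ e => e.2.2) cur h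
  simpa [pvIns] using this

-- get? after an event insert-fold, in terms of the projected pair list
theorem pvGet?_foldl_ins (l : List (Char × Int × Int)) (cur : PySem.Dict Int Int) (k : Int) :
    (l.foldl pvIns cur).get? k = (pvLast (l.map (·.2)) k).or (cur.get? k) := by
  have : l.foldl pvIns cur = (l.map (·.2)).foldl pvInsP cur := by
    rw [List.foldl_map]; rfl
  rw [this, pvGet?_foldl_insP]

-- ---- step 9: the outer day loop ----

def pvFlush (st : PySem.Dict Int Int × Int × List Int × Option Char) : List Int :=
  match st.2.2.2 with
  | some _ => st.2.2.1 ++ [st.2.1]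
  | none => st.2.2.1

theorem pvOuter (g : Char → List (Char × Int × Int)) :
    ∀ (days : List Char) (prev cur : PySem.Dict Int Int) (resA resB : List Int)
      (total : Int) (pd : Option Char),
    days.Pairwise (· < ·) →
    (∀ d ∈ days, g d ≠ [] ∧ ∀ e ∈ g d, e.1 = d) →
    (∀ d ∈ days, pd ≠ some d) →
    prev.keys.Nodup → cur.keys.Nodup →
    (∀ k, cur.get? k = prev.get? k) →
    total = cur.values.sum →
    (match pd with | none => resB = resA | some _ => resA = resB ++ [total]) →
    (days.foldl (fun (st : PySem.Dict Int Int × List Int) d =>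
        let prev' := ((g d).foldl pvIns PySem.Dict.empty).items.foldl pvInsP st.1
        (prev', st.2 ++ [prev'.values.sum])) (prev, resA)).2
      = pvFlush (days.foldl (fun st d => (g d).foldl pvEvStep st) (cur, total, resB, pd)) := by
  intro days
  induction days with
  | nil =>
    intro prev cur resA resB total pd _ _ _ _ _ _ _ hres
    cases pd with
    | none => simpa [pvFlush] using hres.symm
    | some x => simpa [pvFlush] using hres
  | cons d days' ih =>
    intro prev cur resA resB total pd hD hg hpd hndp hndc hget ht hres
    rcases List.pairwise_cons.mp hD with ⟨hdlt, hD'⟩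
    rcases hg d List.mem_cons_self with ⟨hne, hall⟩
    simp only [List.foldl_cons]
    rw [pvGroup d (g d) hne hall cur total resB pd (hpd d List.mem_cons_self) hndc ht]
    set cur' := (g d).foldl pvIns cur with hcur'
    set prev' := ((g d).foldl pvIns PySem.Dict.empty).items.foldl pvInsP prev with hprev'
    have hndc' : cur'.keys.Nodup := pvNodup_foldl_ins _ _ hndc
    have hndg : ((g d).foldl pvIns PySem.Dict.empty).keys.Nodup :=
      pvNodup_foldl_ins _ _ PySem.Dict.nodup_keys_empty
    have hndp' : prev'.keys.Nodup := by
      have := PySem.Dict.nodup_keys_foldl_insert_key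
        ((g d).foldl pvIns PySem.Dict.empty).items (fun q => q.1) (fun _ q => q.2) prev hndp
      simpa [pvInsP] using this
    have hget' : ∀ k, cur'.get? k = prev'.get? k := by
      intro k
      rw [hcur', pvGet?_foldl_ins, hprev', pvGet?_foldl_insP,
          pvLast_items _ _ hndg, pvGet?_foldl_ins, PySem.Dict.get?_empty,
          Option.or_none, hget k]
    have hsum : cur'.values.sum = prev'.values.sum := pvSumEq cur' prev' hndc' hndp' hget'
    have hpd' : ∀ d' ∈ days', (some d : Option Char) ≠ some d' := by
      intro d' hd' h
      have hlt := hdlt d' hd'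
      injection h with h'
      rw [← h'] at hlt
      exact lt_irrefl d hlt
    cases pd with
    | none =>
      exact ih prev' cur' (resA ++ [prev'.values.sum]) resB cur'.values.sum (some d)
        hD' (fun d' hd' => hg d' (List.mem_cons_of_mem _ hd')) hpd' hndp' hndc' hget' rfl
        (by rw [← hres, ← hsum])
    | some x =>
      exact ih prev' cur' (resA ++ [prev'.values.sum]) (resB ++ [total]) cur'.values.sum (some d)
        hD' (fun d' hd' => hg d' (List.mem_cons_of_mem _ hd')) hpd' hndp' hndc' hget' rfl
        (by rw [hres, ← hsum])

-- assembly helpers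
theorem pvKeysA (stocks : List (List (String × Int))) :
    (pvBuildA stocks).keys = PySem.Set.ofList ((pvEvents stocks).map (fun e => e.1)) := by
  rw [pvBuildA_eq]; exact pvKeys_foldl_modStep _

theorem pvGetDA (stocks : List (List (String × Int))) (d : Char) :
    (pvBuildA stocks).getD d PySem.Dict.empty
      = ((pvEvents stocks).filter (fun e => e.1 == d)).foldl pvIns PySem.Dict.empty := by
  rw [pvBuildA_eq, pvGetD_foldl_modStep]
  rfl

theorem pvDaysPairwise (stocks : List (List (String × Int))) :
    (PySem.List.sorted (pvBuildA stocks).keys (fun x => x) false).Pairwise (· < ·) := by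
  rw [pvKeysA]
  exact PySem.List.sorted_ofList_pairwise_lt _

theorem pvSortedDecomp (stocks : List (List (String × Int))) :
    PySem.List.sorted (pvEvents stocks) (fun e => e.1) false
      = (PySem.List.sorted (pvBuildA stocks).keys (fun x => x) false).flatMap
          (fun d => (pvEvents stocks).filter (fun e => e.1 == d)) := by
  have h1 := pvGrouping (PySem.List.sorted (pvBuildA stocks).keys (fun x => x) false)
    (PySem.List.sorted (pvEvents stocks) (fun e => e.1) false)
    (PySem.List.sorted_pairwise (pvEvents stocks) (fun e => e.1))
    (pvDaysPairwise stocks) ?_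
  · rw [← h1]
    simp only [List.flatMap_def]
    exact congrArg List.flatten
      (List.map_congr_left (fun d _ => pvFilter_sorted d (pvEvents stocks)))
  · intro e he
    rw [PySem.List.mem_sorted, pvKeysA, PySem.Set.mem_ofList]
    exact List.mem_map_of_mem ((PySem.List.mem_sorted _ _ _ _).mp he)

theorem pvGroups_ok (stocks : List (List (String × Int))) :
    ∀ d ∈ PySem.List.sorted (pvBuildA stocks).keys (fun x => x) false,
      (pvEvents stocks).filter (fun e => e.1 == d) ≠ [] ∧
      ∀ e ∈ (pvEvents stocks).filter (fun e => e.1 == d), e.1 = d := by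
  intro d hd
  constructor
  · rw [PySem.List.mem_sorted, pvKeysA, PySem.Set.mem_ofList] at hd
    obtain ⟨e, he, hke⟩ := List.mem_map.mp hd
    exact List.ne_nil_of_mem (List.mem_filter.mpr ⟨he, by simp [hke]⟩)
  · intro e he
    simpa using (List.mem_filter.mp he).2

-- ===== VERDICT =====
theorem totalSharesPerDay_spec : Claim_equal_totalSharesPerDay := by
  intro stocks _ _
  unfold Spec_totalSharesPerDay
  have hstepA : (fun (st : PySem.Dict Int Int × List Int) day =>
      let prev := ((pvBuildA stocks).getD day PySem.Dict.empty).items.foldl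
        (fun pr (q : Int × Int) => pr.insert q.1 q.2) st.1
      (prev, st.2 ++ [prev.values.sum]))
    = (fun (st : PySem.Dict Int Int × List Int) d =>
      let prev' := (((pvEvents stocks).filter (fun e => e.1 == d)).foldl pvIns
        PySem.Dict.empty).items.foldl pvInsP st.1
      (prev', st.2 ++ [prev'.values.sum])) := by
    funext st d
    rw [pvGetDA stocks d]
    rfl
  have hmain := pvOuter (fun d => (pvEvents stocks).filter (fun e => e.1 == d))
    (PySem.List.sorted (pvBuildA stocks).keys (fun x => x) false)
    PySem.Dict.empty PySem.Dict.empty [] [] 0 none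
    (pvDaysPairwise stocks) (pvGroups_ok stocks) (by simp)
    PySem.Dict.nodup_keys_empty PySem.Dict.nodup_keys_empty (fun k => rfl) rfl rfl
  calc totalSharesPerDay stocks
      = ((PySem.List.sorted (pvBuildA stocks).keys (fun x => x) false).foldl
          (fun (st : PySem.Dict Int Int × List Int) day =>
            let prev := ((pvBuildA stocks).getD day PySem.Dict.empty).items.foldl
              (fun pr (q : Int × Int) => pr.insert q.1 q.2) st.1
            (prev, st.2 ++ [prev.values.sum])) (PySem.Dict.empty, [])).2 := rfl
    _ = ((PySem.List.sorted (pvBuildA stocks).keys (fun x => x) false).foldl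
          (fun (st : PySem.Dict Int Int × List Int) d =>
            let prev' := (((pvEvents stocks).filter (fun e => e.1 == d)).foldl pvIns
              PySem.Dict.empty).items.foldl pvInsP st.1
            (prev', st.2 ++ [prev'.values.sum])) (PySem.Dict.empty, [])).2 := by
          rw [hstepA]
    _ = pvFlush ((PySem.List.sorted (pvBuildA stocks).keys (fun x => x) false).foldl
          (fun st d => ((pvEvents stocks).filter (fun e => e.1 == d)).foldl pvEvStep st)
          (PySem.Dict.empty, 0, [], none)) := hmain
    _ = pvFlush (((PySem.List.sorted (pvBuildA stocks).keys (fun x => x) false).flatMap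
          (fun d => (pvEvents stocks).filter (fun e => e.1 == d))).foldl pvEvStep
          (PySem.Dict.empty, 0, [], none)) := by
          simp only [List.flatMap_def, List.foldl_flatten, List.foldl_map]
    _ = pvFlush ((PySem.List.sorted (pvEvents stocks) (fun e => e.1) false).foldl pvEvStep
          (PySem.Dict.empty, 0, [], none)) := by rw [pvSortedDecomp]
    _ = totalSharesPerDay_alt stocks := rfl
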